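-- pv_equiv track=rewrite | github.com/gabrieldelisle/Euler-project | euler132.py | Rmod
-- ===== SOURCE A (Python) =====
-- def Rmod(k,n) :
-- 	m = 0
-- 	m10 = 1
-- 	for i in range(k) :
-- 		m+=m10
-- 		m10*=10
-- 		m10%=n
-- 		if m10==1:
-- 			return (k//(i+1)*m+Rmod(k%(i+1),n))%n
-- 	return m%n
-- ===== SOURCE B (Python) =====
-- def Rmod(k, n):
--     # Repunit R(k) mod n by recursive doubling of (sum, power) -- O(log k).
--     def go(k):
--         # returns (R(k) % n, 10**k % n), with k clamped at 0
--         if k <= 0: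
--             return (0, 1 % n)
--         s, p = go(k // 2)
--         s2 = (s * (p + 1)) % n
--         p2 = (p * p) % n
--         if k % 2 == 1:
--             return ((s2 * 10 + 1) % n, (p2 * 10) % n)
--         return (s2, p2)
--     return go(k)[0]
-- ===== Notes on version B (the rewrite author's own statement) =====
-- stated objective: faster
-- what changed: Replaces the digit-by-digit loop with period detection (plus recursion on the remainder) by recursive doubling of the pair (repunit mod n, power of 10 mod n), computing R(k) mod n in O(log k) multiplications.
import Mathlib
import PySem

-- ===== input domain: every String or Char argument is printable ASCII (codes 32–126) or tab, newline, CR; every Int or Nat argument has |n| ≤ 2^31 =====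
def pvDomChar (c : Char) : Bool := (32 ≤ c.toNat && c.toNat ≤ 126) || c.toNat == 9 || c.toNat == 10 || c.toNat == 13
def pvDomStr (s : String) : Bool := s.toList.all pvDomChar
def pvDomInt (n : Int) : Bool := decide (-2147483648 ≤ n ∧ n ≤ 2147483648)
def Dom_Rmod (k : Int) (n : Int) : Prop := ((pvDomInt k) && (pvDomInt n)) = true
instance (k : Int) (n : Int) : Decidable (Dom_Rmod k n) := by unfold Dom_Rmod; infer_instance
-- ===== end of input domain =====

-- B computes R(k) mod n by recursive doubling of (repunit mod n, power of 10 mod n): O(log k) vs A's period-hunting loop.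

-- ===== PORT A =====
-- The for-loop of A, with fuel = number of remaining iterations and i the current index.
-- Returns .inl m when the loop runs out (the final `return m%n` path),
-- or .inr (m, i) when `m10 == 1` fired at index i (the early-return path).
def RmodLoop (n : Int) (m m10 : Int) (i : Nat) : (fuel : Nat) → Int ⊕ (Int × Nat)
  | 0 => .inl m
  | fuel + 1 =>
    let m' := m + m10
    let m10' := PySem.Int.mod (m10 * 10) n
    if m10' = 1 then .inr (m', i)
    else RmodLoop n m' m10' (i + 1) fuel

-- On the early-return path the index is within the fuel (for termination of Rmod below).
theorem RmodLoop_inr_lt (n : Int) : ∀ (fuel : Nat) (m m10 : Int) (i : Nat) (m' : Int) (i' : Nat),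
    RmodLoop n m m10 i fuel = .inr (m', i') → i ≤ i' ∧ i' < i + fuel := by
  intro fuel
  induction fuel with
  | zero => intro m m10 i m' i' h; simp [RmodLoop] at h
  | succ f ih =>
    intro m m10 i m' i' h
    simp only [RmodLoop] at h
    split at h
    · cases h; omega
    · have := ih _ _ _ _ _ h; omega

def Rmod (k : Int) (n : Int) : Int :=
  match hL : RmodLoop n 0 1 0 k.toNat with
  | .inl m => PySem.Int.mod m n
  | .inr (m, i) =>
    PySem.Int.mod (PySem.Int.floordiv k ((i : Int) + 1) * m
      + Rmod (PySem.Int.mod k ((i : Int) + 1)) n) n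
termination_by k.toNat
decreasing_by
  have hlt := RmodLoop_inr_lt n k.toNat 0 1 0 m i hL
  have h1 : (0 : Int) < (i : Int) + 1 := by positivity
  have hb := PySem.Int.mod_nonneg k h1
  have hlt2 := PySem.Int.mod_lt k h1
  omega

-- ===== PORT B =====
-- go n k = (R(k) % n, 10**k % n) with k clamped at 0, by recursive doubling.
def RmodGo (n : Int) (k : Int) : Int × Int :=
  if k ≤ 0 then (0, PySem.Int.mod 1 n)
  else
    let sp := RmodGo n (PySem.Int.floordiv k 2)
    let s2 := PySem.Int.mod (sp.1 * (sp.2 + 1)) n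
    let p2 := PySem.Int.mod (sp.2 * sp.2) n
    if PySem.Int.mod k 2 = 1 then
      (PySem.Int.mod (s2 * 10 + 1) n, PySem.Int.mod (p2 * 10) n)
    else (s2, p2)
termination_by k.toNat
decreasing_by
  have h2 : (0 : Int) < 2 := by norm_num
  have := PySem.Int.mod_nonneg k h2
  have := PySem.Int.mod_lt k h2
  have hd := PySem.Int.floordiv_mul_add_mod k 2
  omega

def Rmod_alt (k : Int) (n : Int) : Int := (RmodGo n k).1

-- ===== PRECONDITION & SPEC =====
-- Pre_ excludes exactly n = 0, where Python's `% n` raises ZeroDivisionError in both A and B.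
def Pre_Rmod (k : Int) (n : Int) : Prop := n ≠ 0
instance (k : Int) (n : Int) : Decidable (Pre_Rmod k n) := by unfold Pre_Rmod; infer_instance
def pvWitness_Rmod : Int × Int := (7, 3)

def Spec_Rmod (k : Int) (n : Int) (out : Int) : Prop := out = Rmod_alt k n
instance (k : Int) (n : Int) (out : Int) : Decidable (Spec_Rmod k n out) := by unfold Spec_Rmod; infer_instance

-- ===== CLAIM (what is proved, stated in full; the proofs are below) =====
def Claim_equal_Rmod : Prop := ∀ (k : Int) (n : Int), Dom_Rmod k n → Pre_Rmod k n → Spec_Rmod k n (Rmod k n)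

-- ===== LEMMAS AND PROOFS =====

-- The repunit 1...1 with j ones, as an integer.
def rep : Nat → Int
  | 0 => 0
  | j + 1 => rep j + 10 ^ j

theorem rep_add (a b : Nat) : rep (a + b) = rep a + 10 ^ a * rep b := by
  induction b with
  | zero => simp [rep]
  | succ b ih =>
    have : a + (b + 1) = (a + b) + 1 := by omega
    rw [this]; simp only [rep]; rw [ih, pow_add]; ring

theorem rep_succ_mul (j : Nat) : rep (j + 1) = 10 * rep j + 1 := by
  calc rep (j + 1) = rep (1 + j) := by rw [Nat.add_comm]
    _ = rep 1 + 10 ^ 1 * rep j := rep_add 1 j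
    _ = 10 * rep j + 1 := by simp [rep]; ring

-- fmod is invariant under ModEq (both %-representative and divisibility transfer).
theorem fmod_eq_of_modEq {n a c : Int} (h : Int.ModEq n a c) : a.fmod n = c.fmod n := by
  rw [Int.fmod_eq_emod, Int.fmod_eq_emod, h]
  have hd : n ∣ a ↔ n ∣ c := by
    constructor <;> intro hx
    · exact (Int.modEq_zero_iff_dvd).1 ((h.symm.trans (Int.modEq_zero_iff_dvd.2 hx)))
    · exact (Int.modEq_zero_iff_dvd).1 ((h.trans (Int.modEq_zero_iff_dvd.2 hx)))
  by_cases h0 : 0 ≤ n ∨ n ∣ a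
  · have : 0 ≤ n ∨ n ∣ c := by tauto
    simp [h0, this]
  · have : ¬ (0 ≤ n ∨ n ∣ c) := by tauto
    simp [h0, this]

theorem fmod_modEq (a n : Int) : Int.ModEq n (a.fmod n) a := by
  rw [Int.fmod_eq_emod]
  split
  · simp [Int.ModEq]
  · calc a % n + n ≡ a % n [ZMOD n] := by simp [Int.ModEq]
      _ ≡ a [ZMOD n] := Int.emod_emod_of_dvd a (dvd_refl n)

theorem pmod_modEq (a n : Int) : Int.ModEq n (PySem.Int.mod a n) a := fmod_modEq a n

theorem pmod_eq_of_modEq {n a c : Int} (h : Int.ModEq n a c) :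
    PySem.Int.mod a n = PySem.Int.mod c n := fmod_eq_of_modEq h

-- If 10^p ≡ 1 (mod n) then rep (q*p + r) ≡ q * rep p + rep r (mod n).
theorem rep_period (n : Int) (p r : Nat) (hp : Int.ModEq n (10 ^ p) 1) :
    ∀ q : Nat, Int.ModEq n (rep (q * p + r)) ((q : Int) * rep p + rep r) := by
  intro q
  induction q with
  | zero => simp
  | succ q ih =>
    have he : (q + 1) * p + r = p + (q * p + r) := by ring
    rw [he, rep_add]
    calc rep p + 10 ^ p * rep (q * p + r)
        ≡ rep p + 1 * ((q : Int) * rep p + rep r) [ZMOD n] := (Int.ModEq.refl _).add (hp.mul ih)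
      _ = ((q : Int) + 1) * rep p + rep r := by ring
      _ = (((q : Nat) + 1 : Nat) : Int) * rep p + rep r := by push_cast; ring

-- The loop invariant of A: with m ≡ rep i and m10 ≡ 10^i, RmodLoop's result is congruent
-- to the repunit it stands for; on the early return, the period fact 10^(i'+1) ≡ 1 holds.
theorem RmodLoop_spec (n : Int) : ∀ (fuel : Nat) (m m10 : Int) (i : Nat),
    Int.ModEq n m (rep i) → Int.ModEq n m10 (10 ^ i) →
    (∀ m', RmodLoop n m m10 i fuel = .inl m' → Int.ModEq n m' (rep (i + fuel))) ∧
    (∀ m' i', RmodLoop n m m10 i fuel = .inr (m', i') →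
      Int.ModEq n m' (rep (i' + 1)) ∧ Int.ModEq n (10 ^ (i' + 1)) 1) := by
  intro fuel
  induction fuel with
  | zero =>
    intro m m10 i hm hm10
    constructor
    · intro m' h; simp only [RmodLoop] at h; cases h; simpa using hm
    · intro m' i' h; simp [RmodLoop] at h
  | succ f ih =>
    intro m m10 i hm hm10
    have hm' : Int.ModEq n (m + m10) (rep (i + 1)) := by
      simpa [rep] using hm.add hm10
    have h10 : Int.ModEq n (PySem.Int.mod (m10 * 10) n) (10 ^ (i + 1)) := by
      calc PySem.Int.mod (m10 * 10) n ≡ m10 * 10 [ZMOD n] := pmod_modEq _ _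
        _ ≡ 10 ^ i * 10 [ZMOD n] := hm10.mul_right 10
        _ = 10 ^ (i + 1) := by rw [pow_succ]
    constructor
    · intro m' h
      simp only [RmodLoop] at h
      split at h
      · exact absurd h (by simp)
      · have := (ih _ _ _ hm' h10).1 m' h
        simpa [Nat.add_comm, Nat.add_assoc, Nat.add_left_comm] using this
    · intro m' i' h
      simp only [RmodLoop] at h
      split at h
      next hone =>
        cases h
        refine ⟨hm', ?_⟩
        rw [← hone]
        exact h10.symm
      · exact (ih _ _ _ hm' h10).2 m' i' h

-- A computes rep k.toNat mod n (Python floor-mod), by strong induction on k.toNat.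
theorem Rmod_eq_rep (n : Int) (hn : n ≠ 0) : ∀ (k : Int),
    Rmod k n = PySem.Int.mod (rep k.toNat) n := by
  intro k
  induction hk : k.toNat using Nat.strong_induction_on generalizing k with
  | _ K IH =>
  subst hk
  rw [Rmod]
  split
  next m hL =>
    exact pmod_eq_of_modEq (by
      simpa using (RmodLoop_spec n k.toNat 0 1 0 (by simp [rep]) (by simp)).1 m hL)
  next m i hL =>
    have hlt := RmodLoop_inr_lt n k.toNat 0 1 0 m i hL
    have hspec := (RmodLoop_spec n k.toNat 0 1 0 (by simp [rep]) (by simp)).2 m i hL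
    have hp1 : (0 : Int) < (i : Int) + 1 := by positivity
    have hrnn := PySem.Int.mod_nonneg k hp1
    have hrlt := PySem.Int.mod_lt k hp1
    set r := PySem.Int.mod k ((i : Int) + 1) with hr
    set q := PySem.Int.floordiv k ((i : Int) + 1) with hq
    have hrec : Rmod r n = PySem.Int.mod (rep r.toNat) n := by
      apply IH r.toNat _ r rfl
      omega
    rw [hrec]
    apply pmod_eq_of_modEq
    -- q ≥ 0 since k ≥ 1 here (the loop ran at least once)
    have hk1 : (1 : Int) ≤ k := by
      by_contra hc
      have : k.toNat = 0 := by omega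
      omega
    have hdiv := PySem.Int.floordiv_mul_add_mod k ((i : Int) + 1)
    have hq0 : 0 ≤ q := by
      by_contra hc
      push_neg at hc
      nlinarith
    -- k.toNat = q.toNat * (i+1) + r.toNat
    have hksplit : k.toNat = q.toNat * (i + 1) + r.toNat := by
      have hcast : ((q.toNat * (i + 1) + r.toNat : Nat) : Int) = k := by
        push_cast [Int.toNat_of_nonneg hq0, Int.toNat_of_nonneg hrnn]
        linarith [hdiv]
      omega
    have hper := rep_period n (i + 1) r.toNat hspec.2 q.toNat
    rw [hksplit]
    calc q * m + PySem.Int.mod (rep r.toNat) n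
        ≡ q * rep (i + 1) + rep r.toNat [ZMOD n] :=
          (hspec.1.mul_left q).add (pmod_modEq _ _)
      _ = (q.toNat : Int) * rep (i + 1) + rep r.toNat := by
          rw [Int.toNat_of_nonneg hq0]
      _ ≡ rep (q.toNat * (i + 1) + r.toNat) [ZMOD n] := hper.symm

-- B computes (rep k.toNat mod n, 10^k.toNat mod n), by strong induction on k.toNat.
theorem RmodGo_eq (n : Int) (hn : n ≠ 0) : ∀ (k : Int),
    RmodGo n k = (PySem.Int.mod (rep k.toNat) n, PySem.Int.mod (10 ^ k.toNat) n) := by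
  intro k
  induction hk : k.toNat using Nat.strong_induction_on generalizing k with
  | _ K IH =>
  subst hk
  rw [RmodGo]
  split
  next hk0 =>
    have : k.toNat = 0 := by omega
    simp [this, rep, PySem.Int.mod]
  next hk0 =>
    push_neg at hk0
    have h2 : (0 : Int) < 2 := by norm_num
    have hmnn := PySem.Int.mod_nonneg k h2
    have hmlt := PySem.Int.mod_lt k h2
    have hdiv := PySem.Int.floordiv_mul_add_mod k 2
    set h := PySem.Int.floordiv k 2 with hh
    have hh0 : 0 ≤ h := by nlinarith
    have hrec : RmodGo n h = (PySem.Int.mod (rep h.toNat) n, PySem.Int.mod (10 ^ h.toNat) n) := by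
      apply IH h.toNat _ h rfl
      omega
    rw [hrec]
    have hs2 : Int.ModEq n (PySem.Int.mod (PySem.Int.mod (rep h.toNat) n * (PySem.Int.mod (10 ^ h.toNat) n + 1)) n)
        (rep (h.toNat + h.toNat)) := by
      calc PySem.Int.mod (PySem.Int.mod (rep h.toNat) n * (PySem.Int.mod (10 ^ h.toNat) n + 1)) n
          ≡ PySem.Int.mod (rep h.toNat) n * (PySem.Int.mod (10 ^ h.toNat) n + 1) [ZMOD n] := pmod_modEq _ _
        _ ≡ rep h.toNat * (10 ^ h.toNat + 1) [ZMOD n] :=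
            (pmod_modEq _ _).mul ((pmod_modEq _ _).add_right 1)
        _ = rep (h.toNat + h.toNat) := by rw [rep_add]; ring
    have hp2 : Int.ModEq n (PySem.Int.mod (PySem.Int.mod (10 ^ h.toNat) n * PySem.Int.mod (10 ^ h.toNat) n) n)
        (10 ^ (h.toNat + h.toNat)) := by
      calc PySem.Int.mod (PySem.Int.mod (10 ^ h.toNat) n * PySem.Int.mod (10 ^ h.toNat) n) n
          ≡ PySem.Int.mod (10 ^ h.toNat) n * PySem.Int.mod (10 ^ h.toNat) n [ZMOD n] := pmod_modEq _ _
        _ ≡ 10 ^ h.toNat * 10 ^ h.toNat [ZMOD n] := (pmod_modEq _ _).mul (pmod_modEq _ _)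
        _ = 10 ^ (h.toNat + h.toNat) := by rw [pow_add]
    split
    next hodd =>
      -- k = 2h + 1, k.toNat = 2*h.toNat + 1
      have hkeq : k.toNat = h.toNat + h.toNat + 1 := by
        have : PySem.Int.mod k 2 = 1 := hodd
        omega
      simp only [Prod.mk.injEq]
      constructor
      · apply pmod_eq_of_modEq
        calc PySem.Int.mod (PySem.Int.mod (rep h.toNat) n * (PySem.Int.mod (10 ^ h.toNat) n + 1)) n * 10 + 1
            ≡ rep (h.toNat + h.toNat) * 10 + 1 [ZMOD n] := (hs2.mul_right 10).add_right 1
          _ = rep k.toNat := by rw [hkeq, rep_succ_mul]; ring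
      · apply pmod_eq_of_modEq
        calc PySem.Int.mod (PySem.Int.mod (10 ^ h.toNat) n * PySem.Int.mod (10 ^ h.toNat) n) n * 10
            ≡ 10 ^ (h.toNat + h.toNat) * 10 [ZMOD n] := hp2.mul_right 10
          _ = 10 ^ k.toNat := by rw [hkeq, pow_succ]
    next heven =>
      have hkeq : k.toNat = h.toNat + h.toNat := by
        have : PySem.Int.mod k 2 = 0 := by omega
        omega
      simp only [Prod.mk.injEq]
      exact ⟨pmod_eq_of_modEq (by rw [hkeq]; exact (pmod_modEq _ _).symm.trans hs2),
             pmod_eq_of_modEq (by rw [hkeq]; exact (pmod_modEq _ _).symm.trans hp2)⟩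

-- ===== VERDICT (by name: the statement is the Claim_ definition above) =====
theorem Rmod_spec : Claim_equal_Rmod := by
  intro k n _ hn
  unfold Spec_Rmod Rmod_alt
  rw [Rmod_eq_rep n hn k, RmodGo_eq n hn k]
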